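-- pv_equiv track=rewrite | github.com/aaronhackney/ios_to_asa | convert.py | get_object_groups
-- ===== SOURCE A (Python) =====
-- def get_object_groups(config):
--     object_group_indicies = list()
--     for i in range (len(config)):
--         if config[i].strip().startswith("object"):
--             object_group_indicies.append(i)
--
--     object_groups = list()
--     prev_index = 0
--     for index in object_group_indicies:
--         if index != 0:
--             object_groups.append(config[prev_index:index])  # Get the slice of object-group
--             prev_index = index                              # Next object-group starts here
--     object_groups.append(config[prev_index:] )          # Get the final object-group
--
--     return object_groups
-- ===== SOURCE B (Python) =====
-- def get_object_groups(config):
--     # Single streaming pass: maintain the current block; start a new one at each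
--     # "object" line after the first line.
--     if not config:
--         return [[]]
--     groups = []
--     cur = [config[0]]
--     for line in config[1:]:
--         if line.strip().startswith("object"):
--             groups.append(cur)
--             cur = [line]
--         else:
--             cur.append(line)
--     groups.append(cur)
--     return groups
-- ===== Notes on version B (the rewrite author's own statement) =====
-- stated objective: simpler
-- what changed: Replaces A's two passes (collect marker indices by range scan, then re-slice the list between consecutive indices) with one streaming pass that accumulates the current block and flushes it at each marker line after the first.
import Mathlib
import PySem

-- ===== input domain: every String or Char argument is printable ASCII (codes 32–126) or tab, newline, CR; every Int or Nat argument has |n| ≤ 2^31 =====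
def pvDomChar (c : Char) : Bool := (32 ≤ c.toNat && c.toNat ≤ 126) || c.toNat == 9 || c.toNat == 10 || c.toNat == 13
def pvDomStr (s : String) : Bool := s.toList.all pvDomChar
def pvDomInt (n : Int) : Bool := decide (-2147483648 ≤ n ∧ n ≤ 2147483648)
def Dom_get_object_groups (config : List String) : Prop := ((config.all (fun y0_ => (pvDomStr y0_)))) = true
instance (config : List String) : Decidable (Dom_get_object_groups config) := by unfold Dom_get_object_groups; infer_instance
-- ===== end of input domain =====

-- B replaces A's two passes (collect marker indices, then slice between them) with one
-- streaming pass accumulating the current block (objective: simpler; no speed claim).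

-- ===== PORT A =====
-- line.strip().startswith("object"), shared by both ports
def pvIsObj (s : String) : Bool := PySem.Str.startswith (PySem.Str.strip s) "object"

-- indices always lie in range(len(config)), so pyGetD's default "" is never used
def get_object_groups (config : List String) : List (List String) :=
  let object_group_indicies : List Int :=
    (PySem.List.pyRange 0 (config.length : Int) 1).foldl
      (fun acc i => if pvIsObj (PySem.List.pyGetD config i "") then acc ++ [i] else acc) []
  let st : List (List String) × Int :=
    object_group_indicies.foldl
      (fun st index =>
        if index ≠ 0 then (st.1 ++ [PySem.List.slice config (some st.2) (some index)], index)
        else st) ([], 0)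
  st.1 ++ [PySem.List.slice config (some st.2) none]

def get_object_groups_alt (config : List String) : List (List String) :=
  match config with
  | [] => [[]]
  | x :: xs =>
    let st : List (List String) × List String :=
      xs.foldl (fun st line =>
        if pvIsObj line then (st.1 ++ [st.2], [line]) else (st.1, st.2 ++ [line])) ([], [x])
    st.1 ++ [st.2]

-- ===== PRECONDITION & SPEC =====
def Spec_get_object_groups (config : List String) (out : List (List String)) : Prop := out = get_object_groups_alt config
instance (config : List String) (out : List (List String)) : Decidable (Spec_get_object_groups config out) := by unfold Spec_get_object_groups; infer_instance

-- ===== CLAIM (what is proved, stated in full; the proofs are below) =====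
def Claim_equal_get_object_groups : Prop := ∀ (config : List String), Dom_get_object_groups config → Spec_get_object_groups config (get_object_groups config)

-- ===== LEMMAS AND PROOFS =====

def pvStepA (config : List String) (st : List (List String) × Int) (index : Int) :
    List (List String) × Int :=
  if index ≠ 0 then (st.1 ++ [PySem.List.slice config (some st.2) (some index)], index)
  else st

def pvStepB (st : List (List String) × List String) (line : String) :
    List (List String) × List String :=
  if pvIsObj line then (st.1 ++ [st.2], [line]) else (st.1, st.2 ++ [line])

def pvAst (config : List String) : List (List String) × Int :=
  ((PySem.List.pyRange 0 (config.length : Int) 1).filter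
    (fun i => pvIsObj (PySem.List.pyGetD config i ""))).foldl (pvStepA config) ([], 0)

def pvBst (x : String) (xs : List String) : List (List String) × List String :=
  xs.foldl pvStepB ([], [x])

theorem pv_slice_append {l : List String} {y : String} {a b : Int}
    (ha : 0 ≤ a) (hb : 0 ≤ b) (hbl : b ≤ l.length) :
    PySem.List.slice (l ++ [y]) (some a) (some b) = PySem.List.slice l (some a) (some b) := by
  have h1 : (l ++ [y]).length = l.length + 1 := by simp
  rw [PySem.List.slice_toNat _ ha hb, PySem.List.slice_toNat _ ha hb]
  by_cases hal : a.toNat ≤ l.length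
  · rw [List.drop_append_of_le_length hal, List.take_append_of_le_length (by
      simp only [List.length_drop]; omega)]
  · rw [List.drop_of_length_le (by omega), List.drop_of_length_le (by omega)]

theorem pv_idxs_filter (config : List String) :
    (PySem.List.pyRange 0 (config.length : Int) 1).foldl
      (fun acc i => if pvIsObj (PySem.List.pyGetD config i "") then acc ++ [i] else acc) []
    = (PySem.List.pyRange 0 (config.length : Int) 1).filter
        (fun i => pvIsObj (PySem.List.pyGetD config i "")) := by
  simpa using PySem.List.foldl_append_if
    (fun i => pvIsObj (PySem.List.pyGetD config i "")) id
    (PySem.List.pyRange 0 (config.length : Int) 1) []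

theorem pv_A_eq (config : List String) :
    get_object_groups config
    = (pvAst config).1 ++ [PySem.List.slice config (some (pvAst config).2) none] := by
  simp only [get_object_groups, pv_idxs_filter]
  rfl

theorem pv_alt_eq (x : String) (xs : List String) :
    get_object_groups_alt (x :: xs) = (pvBst x xs).1 ++ [(pvBst x xs).2] := rfl

theorem pv_loopA (l : List String) (y : String) :
    ∀ (idxs : List Int), (∀ i ∈ idxs, 0 ≤ i ∧ i < (l.length : Int)) →
    ∀ (g : List (List String)) (p : Int), 0 ≤ p → p ≤ (l.length : Int) →
      idxs.foldl (pvStepA (l ++ [y])) (g, p) = idxs.foldl (pvStepA l) (g, p)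
      ∧ 0 ≤ (idxs.foldl (pvStepA l) (g, p)).2
      ∧ (idxs.foldl (pvStepA l) (g, p)).2 ≤ (l.length : Int) := by
  intro idxs
  induction idxs with
  | nil => intro _ g p h0 hl; exact ⟨rfl, h0, hl⟩
  | cons i rest ih =>
    intro h g p h0 hl
    have hi := h i (by simp)
    have hrest : ∀ j ∈ rest, 0 ≤ j ∧ j < (l.length : Int) := fun j hj => h j (by simp [hj])
    simp only [List.foldl_cons]
    by_cases hiz : i = 0
    · subst hiz
      simp only [pvStepA, ne_eq, not_true_eq_false, if_false]
      exact ih hrest g p h0 hl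
    · simp only [pvStepA, ne_eq, hiz, not_false_eq_true, if_true]
      rw [pv_slice_append h0 hi.1 (le_of_lt hi.2)]
      exact ih hrest _ i hi.1 (le_of_lt hi.2)

theorem pv_filter_append (l : List String) (y : String) :
    (PySem.List.pyRange 0 ((l ++ [y]).length : Int) 1).filter
      (fun i => pvIsObj (PySem.List.pyGetD (l ++ [y]) i ""))
    = ((PySem.List.pyRange 0 (l.length : Int) 1).filter
        (fun i => pvIsObj (PySem.List.pyGetD l i "")))
      ++ (if pvIsObj y then [(l.length : Int)] else []) := by
  have h1 : ((l ++ [y]).length : Int) = (l.length : Int) + 1 := by simp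
  have hy : PySem.List.pyGetD (l ++ [y]) (l.length : Int) "" = y := by
    rw [PySem.List.pyGetD_eq_getElem _ _ (Int.natCast_nonneg _) (by rw [h1]; omega)]
    simp
  have e1 : (PySem.List.pyRange 0 (l.length : Int) 1).filter
      (fun i => pvIsObj (PySem.List.pyGetD (l ++ [y]) i ""))
    = (PySem.List.pyRange 0 (l.length : Int) 1).filter
      (fun i => pvIsObj (PySem.List.pyGetD l i "")) := by
    apply List.filter_congr
    intro i hi
    obtain ⟨h0, hlt⟩ := (PySem.List.mem_pyRange_one).1 hi
    have hlen : i < ((l ++ [y]).length : Int) := by rw [h1]; omega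
    rw [PySem.List.pyGetD_eq_getElem _ _ h0 hlen,
        PySem.List.pyGetD_eq_getElem _ _ h0 hlt]
    rw [List.getElem_append_left (by omega)]
  have e2 : List.filter (fun i => pvIsObj (PySem.List.pyGetD (l ++ [y]) i ""))
      [(l.length : Int)] = (if pvIsObj y then [(l.length : Int)] else []) := by
    rw [List.filter_singleton, hy]
    cases pvIsObj y <;> rfl
  rw [h1, PySem.List.pyRange_one_succ_right (Int.natCast_nonneg _), List.filter_append, e1, e2]

theorem pv_main (config : List String) :
    get_object_groups config = get_object_groups_alt config
    ∧ 0 ≤ (pvAst config).2 ∧ (pvAst config).2 ≤ (config.length : Int) := by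
  induction config using List.reverseRecOn with
  | nil => refine ⟨by decide, by decide, by decide⟩
  | append_singleton l y ih =>
    obtain ⟨hA, hp0, hpl⟩ := ih
    have hbounds : ∀ i ∈ (PySem.List.pyRange 0 (l.length : Int) 1).filter
        (fun i => pvIsObj (PySem.List.pyGetD l i "")), 0 ≤ i ∧ i < (l.length : Int) :=
      fun i hi => (PySem.List.mem_pyRange_one).1 (List.mem_of_mem_filter hi)
    have hloop := pv_loopA l y _ hbounds [] 0 le_rfl (Int.natCast_nonneg _)
    have hAst : pvAst (l ++ [y])
        = (if pvIsObj y then pvStepA (l ++ [y]) (pvAst l) (l.length : Int) else pvAst l) := by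
      show (((PySem.List.pyRange 0 ((l ++ [y]).length : Int) 1).filter
          (fun i => pvIsObj (PySem.List.pyGetD (l ++ [y]) i ""))).foldl
            (pvStepA (l ++ [y])) ([], 0)) = _
      rw [pv_filter_append, List.foldl_append, hloop.1]
      cases hy : pvIsObj y
      · rfl
      · rfl
    clear hloop hbounds
    cases l with
    | nil =>
      have hAst0 : pvAst ([] ++ [y]) = ([], 0) := by
        rw [hAst]; cases pvIsObj y <;> rfl
      refine ⟨?_, by rw [hAst0], by rw [hAst0]; simp⟩
      rw [pv_A_eq, hAst0]
      simp only [List.nil_append]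
      rw [PySem.List.slice_from _ le_rfl]
      rfl
    | cons x xs =>
      set N : Int := ((x :: xs).length : Int) with hN
      have hNpos : 0 < N := by simp [hN]
      rw [pv_A_eq, pv_alt_eq] at hA
      obtain ⟨hg, hc⟩ := List.append_inj' hA rfl
      have hcur : PySem.List.slice (x :: xs) (some (pvAst (x :: xs)).2) none
          = (pvBst x xs).2 := by injection hc
      have hlen2 : ((x :: xs ++ [y]).length : Int) = N + 1 := by simp [hN]
      by_cases hy : pvIsObj y
      · -- marker line: a new block starts
        have hstep : pvAst (x :: xs ++ [y])
            = ((pvAst (x :: xs)).1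
               ++ [PySem.List.slice (x :: xs ++ [y]) (some (pvAst (x :: xs)).2) (some N)], N) := by
          rw [hAst, if_pos hy]
          simp only [pvStepA, ne_eq, hNpos.ne', not_false_eq_true, if_true]
        have hslice1 : PySem.List.slice (x :: xs ++ [y]) (some (pvAst (x :: xs)).2) (some N)
            = (pvBst x xs).2 := by
          rw [pv_slice_append hp0 (le_of_lt hNpos) (le_of_eq hN.symm), ← hcur,
              PySem.List.slice_toNat _ hp0 (le_of_lt hNpos),
              PySem.List.slice_from _ hp0]
          apply List.take_of_length_le
          simp only [List.length_drop]
          omega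
        have hslice2 : PySem.List.slice (x :: xs ++ [y]) (some N) none = [y] := by
          rw [PySem.List.slice_from _ (le_of_lt hNpos)]
          have : N.toNat = (x :: xs).length := by simp [hN]
          rw [this, List.drop_append_of_le_length le_rfl, List.drop_length, List.nil_append]
        refine ⟨?_, ?_, ?_⟩
        · rw [pv_A_eq, hstep]
          simp only []
          rw [hslice1, hslice2, hg]
          have : (x :: xs) ++ [y] = x :: (xs ++ [y]) := rfl
          rw [this, pv_alt_eq]
          have hB : pvBst x (xs ++ [y]) = ((pvBst x xs).1 ++ [(pvBst x xs).2], [y]) := by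
            unfold pvBst
            rw [List.foldl_append]
            simp [pvStepB, hy]
          rw [hB]
        · rw [hstep]; exact le_of_lt hNpos
        · rw [hstep, hlen2]; omega
      · -- ordinary line: extend the current block
        have hstep : pvAst (x :: xs ++ [y]) = pvAst (x :: xs) := by rw [hAst, if_neg hy]
        have hslice : PySem.List.slice (x :: xs ++ [y]) (some (pvAst (x :: xs)).2) none
            = (pvBst x xs).2 ++ [y] := by
          rw [PySem.List.slice_from _ hp0, ← hcur, PySem.List.slice_from _ hp0,
              List.drop_append_of_le_length (by omega)]
        refine ⟨?_, ?_, ?_⟩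
        · rw [pv_A_eq, hstep, hslice, hg]
          have : (x :: xs) ++ [y] = x :: (xs ++ [y]) := rfl
          rw [this, pv_alt_eq]
          have hB : pvBst x (xs ++ [y]) = ((pvBst x xs).1, (pvBst x xs).2 ++ [y]) := by
            unfold pvBst
            rw [List.foldl_append]
            simp [pvStepB, hy]
          rw [hB]
        · rw [hstep]; exact hp0
        · rw [hstep, hlen2]; omega

-- ===== VERDICT (by name: the statement is the Claim_ definition above) =====
theorem get_object_groups_spec : Claim_equal_get_object_groups := by
  intro config _
  unfold Spec_get_object_groups
  exact (pv_main config).1
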